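-- pv_equiv track=rewrite | github.com/gridvisi/Python_workspace | 3 codewars/6 kyu/6 kyu Yes No Yes No.py | yes_no
-- ===== SOURCE A (Python) =====
-- def yes_no(arr):
--     counter = 0
--     out = []
--     _in = []
--     while arr:
--         for i in arr:
--             if counter % 2 == 0:
--                 out.append(i)
--             else:
--                 _in.append(i)
--             counter += 1
--         arr = _in
--         _in = []
--     return out
-- ===== SOURCE B (Python) =====
-- def yes_no(arr):
--     # single FIFO pass: the list itself is the queue, scanned by an index;
--     # skipped elements are appended to the back and reprocessed later
--     q = list(arr)
--     out = []
--     i = 0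
--     counter = 0
--     while i < len(q):
--         x = q[i]
--         i += 1
--         if counter % 2 == 0:
--             out.append(x)
--         else:
--             q.append(x)
--         counter += 1
--     return out
-- ===== Notes on version B (the rewrite author's own statement) =====
-- stated objective: simpler
-- what changed: The nested round-by-round loop (iterate arr, collect skipped elements into _in, restart on _in) collapses into one continuous FIFO pass: the input is treated as a queue scanned once by an index, with skipped elements appended to its back.
import Mathlib
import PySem

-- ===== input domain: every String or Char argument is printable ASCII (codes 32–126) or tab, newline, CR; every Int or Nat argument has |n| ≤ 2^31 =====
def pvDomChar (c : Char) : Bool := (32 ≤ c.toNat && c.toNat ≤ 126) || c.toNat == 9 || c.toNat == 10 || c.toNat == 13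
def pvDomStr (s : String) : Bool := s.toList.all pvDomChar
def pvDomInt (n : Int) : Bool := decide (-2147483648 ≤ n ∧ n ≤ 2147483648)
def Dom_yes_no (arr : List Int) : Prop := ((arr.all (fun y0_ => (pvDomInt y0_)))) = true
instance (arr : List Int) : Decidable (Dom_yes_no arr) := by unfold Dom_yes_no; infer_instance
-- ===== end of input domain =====

-- B replaces A's round-by-round rebuild (arr / _in swap) by one continuous FIFO pass over a
-- single queue scanned by an index; objective: simpler (same O(n) cost).

-- ===== PORT A =====
-- one round: 'for i in arr: …' over the state (counter, out, _in)
def yesNoRound : List Int → Int × List Int × List Int → Int × List Int × List Int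
  | [], s => s
  | i :: t, (c, out, inn) =>
      yesNoRound t (if PySem.Int.mod c 2 = 0 then (c + 1, out ++ [i], inn) else (c + 1, out, inn ++ [i]))

-- the Python while loop: at each loop head _in = [] (it is reset at the end of every round).
-- Structural on a fuel argument so the kernel can evaluate it; 2*|arr|+1 fuel always suffices
-- (proved in yesNoWhileF_eq_B below), so the fuel-0 branch is never reached by yes_no.
def yesNoWhileF : Nat → List Int → Int → List Int → List Int
  | _, [], _, out => out
  | 0, _ :: _, _, out => out
  | fuel + 1, a :: t, c, out =>
      yesNoWhileF fuel (yesNoRound (a :: t) (c, out, [])).2.2 (yesNoRound (a :: t) (c, out, [])).1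
        (yesNoRound (a :: t) (c, out, [])).2.1

def yes_no (arr : List Int) : List Int := yesNoWhileF (2 * arr.length + 1) arr 0 []

-- ===== PORT B =====
-- single pass: q is the queue, scanned by index i; skipped elements are appended to the back.
-- Structural on a fuel argument so the kernel can evaluate it; 2*|arr|+1 fuel always suffices
-- (proved in yesNoQueueF_eq_B below), so the fuel-0 branch is never reached by yes_no_alt.
def yesNoQueueF : Nat → List Int → Nat → Int → List Int → List Int
  | 0, _, _, _, out => out
  | fuel + 1, q, i, c, out =>
      if h : i < q.length then
        if PySem.Int.mod c 2 = 0 then yesNoQueueF fuel q (i + 1) (c + 1) (out ++ [q[i]])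
        else yesNoQueueF fuel (q ++ [q[i]]) (i + 1) (c + 1) out
      else out

def yes_no_alt (arr : List Int) : List Int := yesNoQueueF (2 * arr.length + 1) arr 0 0 []

-- ===== PRECONDITION & SPEC =====
def Spec_yes_no (arr : List Int) (out : List Int) : Prop := out = yes_no_alt arr
instance (arr : List Int) (out : List Int) : Decidable (Spec_yes_no arr out) := by unfold Spec_yes_no; infer_instance

-- ===== CLAIM (what is proved, stated in full; the proofs are below) =====
def Claim_equal_yes_no : Prop := ∀ (arr : List Int), Dom_yes_no arr → Spec_yes_no arr (yes_no arr)

-- ===== LEMMAS AND PROOFS =====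

-- parity bit of the running counter (used only by the termination measures)
def pvBit (c : Int) : Nat := if PySem.Int.mod c 2 = 0 then 0 else 1

theorem pvBit_even {c : Int} (h : PySem.Int.mod c 2 = 0) : pvBit c = 0 ∧ pvBit (c + 1) = 1 := by
  simp only [pvBit, PySem.Int.mod_eq_emod_of_pos (a := c) (by norm_num : (0:Int) < 2),
    PySem.Int.mod_eq_emod_of_pos (a := c + 1) (by norm_num : (0:Int) < 2)] at *
  constructor <;> split <;> omega

theorem pvBit_odd {c : Int} (h : ¬ PySem.Int.mod c 2 = 0) : pvBit c = 1 ∧ pvBit (c + 1) = 0 := by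
  simp only [pvBit, PySem.Int.mod_eq_emod_of_pos (a := c) (by norm_num : (0:Int) < 2),
    PySem.Int.mod_eq_emod_of_pos (a := c + 1) (by norm_num : (0:Int) < 2)] at *
  constructor <;> split <;> omega

-- measure of one round (used by the fuel-sufficiency arguments below)
theorem yesNoRound_measure (l : List Int) (c : Int) (out inn : List Int) :
    2 * (yesNoRound l (c, out, inn)).2.2.length + pvBit (yesNoRound l (c, out, inn)).1
      = 2 * inn.length + pvBit c + l.length := by
  induction l generalizing c out inn with
  | nil => simp [yesNoRound]
  | cons x t ih =>
      by_cases h : PySem.Int.mod c 2 = 0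
      · obtain ⟨h1, h2⟩ := pvBit_even h
        simp only [yesNoRound, if_pos h]
        rw [ih]
        simp only [List.length_cons]
        omega
      · obtain ⟨h1, h2⟩ := pvBit_odd h
        simp only [yesNoRound, if_neg h]
        rw [ih]
        simp only [List.length_append, List.length_cons, List.length_nil]
        omega

-- proof-side queue loop (structural, no index): common form both ports reduce to
def yesNoB (q : List Int) (c : Int) (out : List Int) : List Int :=
  match q with
  | [] => out
  | x :: rest =>
      if PySem.Int.mod c 2 = 0 then yesNoB rest (c + 1) (out ++ [x])
      else yesNoB (rest ++ [x]) (c + 1) out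
termination_by 2 * q.length + pvBit c
decreasing_by
  · have := pvBit_even (by assumption)
    simp only [List.length_cons]
    omega
  · have := pvBit_odd (by assumption)
    simp only [List.length_append, List.length_cons, List.length_nil]
    omega

theorem yesNoQueueF_eq_B (fuel : Nat) (q : List Int) (i : Nat) (c : Int) (out : List Int)
    (hf : 2 * (q.length - i) + pvBit c < fuel) :
    yesNoQueueF fuel q i c out = yesNoB (q.drop i) c out := by
  induction fuel generalizing q i c out with
  | zero => omega
  | succ fuel ih =>
      rw [yesNoQueueF]
      by_cases h : i < q.length
      · rw [dif_pos h]
        by_cases hpar : PySem.Int.mod c 2 = 0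
        · obtain ⟨h1, h2⟩ := pvBit_even hpar
          rw [if_pos hpar, ih q (i + 1) (c + 1) (out ++ [q[i]]) (by omega),
            List.drop_eq_getElem_cons h, yesNoB, if_pos hpar]
        · obtain ⟨h1, h2⟩ := pvBit_odd hpar
          rw [if_neg hpar,
            ih (q ++ [q[i]]) (i + 1) (c + 1) out
              (by simp only [List.length_append, List.length_cons, List.length_nil]; omega),
            List.drop_eq_getElem_cons h, yesNoB, if_neg hpar,
            List.drop_append_of_le_length (by omega)]
      · rw [dif_neg h, List.drop_eq_nil_of_le (by omega), yesNoB]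

theorem yesNoB_round (l : List Int) (inn : List Int) (c : Int) (out : List Int) :
    yesNoB (l ++ inn) c out
      = yesNoB (yesNoRound l (c, out, inn)).2.2 (yesNoRound l (c, out, inn)).1
          (yesNoRound l (c, out, inn)).2.1 := by
  induction l generalizing inn c out with
  | nil => simp [yesNoRound]
  | cons x t ih =>
      by_cases h : PySem.Int.mod c 2 = 0
      · rw [List.cons_append, yesNoB, if_pos h]
        simpa only [yesNoRound, if_pos h] using ih inn (c + 1) (out ++ [x])
      · rw [List.cons_append, yesNoB, if_neg h, List.append_assoc]
        simpa only [yesNoRound, if_neg h] using ih (inn ++ [x]) (c + 1) out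

theorem yesNoWhileF_eq_B (fuel : Nat) (arr : List Int) (c : Int) (out : List Int)
    (hf : 2 * arr.length + pvBit c < fuel) :
    yesNoWhileF fuel arr c out = yesNoB arr c out := by
  induction fuel generalizing arr c out with
  | zero => omega
  | succ fuel ih =>
      match arr with
      | [] => rw [yesNoWhileF, yesNoB]
      | a :: t =>
          rw [yesNoWhileF,
            ih _ _ _ (by
              have := yesNoRound_measure (a :: t) c out []
              simp only [List.length_nil, List.length_cons] at *
              omega)]
          simpa using (yesNoB_round (a :: t) [] c out).symm

-- ===== VERDICT (by name: the statement is the Claim_ definition above) =====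
theorem yes_no_spec : Claim_equal_yes_no := by
  intro arr _
  have hb : pvBit 0 = 0 := by decide
  unfold Spec_yes_no yes_no yes_no_alt
  rw [yesNoWhileF_eq_B _ _ _ _ (by omega),
    yesNoQueueF_eq_B _ _ _ _ _ (by simp only [Nat.sub_zero]; omega), List.drop_zero]
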